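-- pv_equiv track=rewrite | github.com/Dovile-D/Vardiniai-zenkliukai | main.py | sarasas_is_int
-- ===== SOURCE A (Python) =====
-- def sarasas_is_int (duotas_kiekis, pradine_kaina):
--     """Funkcija grazinanti sarasa, kurio ilgis lygus perduodam per parametra skaiciui "duotas_kiekis", o elementai
--     lygus, per parametra perduodamam kitam skaiciui "pradine_kaina" - nuolaida"""
--     sarasas_su_nuolaida = []
--     for i in range(duotas_kiekis):
--         if i < 3:
--             sarasas_su_nuolaida.append(pradine_kaina)
--         elif i < 4:
--             sarasas_su_nuolaida.append(pradine_kaina - 1)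
--         elif i < 5:
--             sarasas_su_nuolaida.append(pradine_kaina - 2)
--         elif i < 6:
--             sarasas_su_nuolaida.append(pradine_kaina - 3)
--         else:
--             sarasas_su_nuolaida.append(pradine_kaina - 4)
--
--     return sarasas_su_nuolaida
-- ===== SOURCE B (Python) =====
-- def sarasas_is_int(duotas_kiekis, pradine_kaina):
--     """Same result as A, built in three blocks instead of a per-index if/elif ladder."""
--     n = max(duotas_kiekis, 0)
--     head = [pradine_kaina] * min(n, 3)
--     mid = [pradine_kaina - (i - 2) for i in range(3, min(n, 6))]
--     tail = [pradine_kaina - 4] * max(n - 6, 0)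
--     return head + mid + tail
-- ===== Notes on version B (the rewrite author's own statement) =====
-- stated objective: faster
-- what changed: Replaces the per-index if/elif ladder inside a loop by building the list as three blocks (list-repetition for the flat prefix/tail plus a short ramp), removing per-element branching.
import Mathlib
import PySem

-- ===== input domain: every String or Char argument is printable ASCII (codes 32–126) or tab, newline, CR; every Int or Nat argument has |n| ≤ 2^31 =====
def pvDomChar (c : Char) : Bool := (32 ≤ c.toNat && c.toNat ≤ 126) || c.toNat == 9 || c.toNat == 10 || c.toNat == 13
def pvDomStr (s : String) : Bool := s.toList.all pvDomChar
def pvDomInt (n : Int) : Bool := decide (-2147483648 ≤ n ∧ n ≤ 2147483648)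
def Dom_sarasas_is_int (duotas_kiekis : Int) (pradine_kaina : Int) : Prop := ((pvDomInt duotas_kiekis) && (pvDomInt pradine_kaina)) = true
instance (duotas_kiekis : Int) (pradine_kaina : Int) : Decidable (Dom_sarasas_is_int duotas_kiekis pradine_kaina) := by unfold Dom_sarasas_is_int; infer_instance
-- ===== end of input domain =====

-- B builds the result as three blocks (flat prefix, ramp, flat tail) instead of A's
-- per-index if/elif ladder; objective: simpler.

-- ===== PORT A =====
def sarasas_is_int (duotas_kiekis : Int) (pradine_kaina : Int) : List Int :=
  (PySem.List.pyRange 0 duotas_kiekis 1).foldl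
    (fun acc i =>
      acc ++ [if i < 3 then pradine_kaina
              else if i < 4 then pradine_kaina - 1
              else if i < 5 then pradine_kaina - 2
              else if i < 6 then pradine_kaina - 3
              else pradine_kaina - 4]) []

-- ===== PORT B =====
def sarasas_is_int_alt (duotas_kiekis : Int) (pradine_kaina : Int) : List Int :=
  let n := max duotas_kiekis 0
  List.replicate (min n 3).toNat pradine_kaina
    ++ (PySem.List.pyRange 3 (min n 6) 1).map (fun i => pradine_kaina - (i - 2))
    ++ List.replicate (max (n - 6) 0).toNat (pradine_kaina - 4)

-- ===== PRECONDITION & SPEC =====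
def Spec_sarasas_is_int (duotas_kiekis : Int) (pradine_kaina : Int) (out : List Int) : Prop := out = sarasas_is_int_alt duotas_kiekis pradine_kaina
instance (duotas_kiekis : Int) (pradine_kaina : Int) (out : List Int) : Decidable (Spec_sarasas_is_int duotas_kiekis pradine_kaina out) := by unfold Spec_sarasas_is_int; infer_instance

-- ===== CLAIM (what is proved, stated in full; the proofs are below) =====
def Claim_equal_sarasas_is_int : Prop := ∀ (duotas_kiekis : Int) (pradine_kaina : Int), Dom_sarasas_is_int duotas_kiekis pradine_kaina → Spec_sarasas_is_int duotas_kiekis pradine_kaina (sarasas_is_int duotas_kiekis pradine_kaina)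

-- ===== LEMMAS AND PROOFS =====

-- the ladder A applies at each index
def pvLadder (p i : Int) : Int :=
  if i < 3 then p else if i < 4 then p - 1 else if i < 5 then p - 2
  else if i < 6 then p - 3 else p - 4

lemma pvKey (p : Int) : ∀ n : Nat,
    (PySem.List.pyRange 0 (n : Int) 1).map (pvLadder p) =
      List.replicate (min (n : Int) 3).toNat p
        ++ (PySem.List.pyRange 3 (min (n : Int) 6) 1).map (fun i => p - (i - 2))
        ++ List.replicate (max ((n : Int) - 6) 0).toNat (p - 4) := by
  intro n
  induction n with
  | zero =>
    simp [PySem.List.pyRange_one_eq_nil]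
  | succ n ih =>
    have h1 : ((n + 1 : Nat) : Int) = (n : Int) + 1 := by push_cast; ring
    rw [h1, PySem.List.pyRange_one_succ_right (by exact_mod_cast Nat.zero_le n),
        List.map_append, ih]
    by_cases h3 : n < 3
    · have ha : (min ((n : Int) + 1) 3).toNat = (min (n : Int) 3).toNat + 1 := by
        rw [min_eq_left (by omega), min_eq_left (by omega)]; omega
      have hb : PySem.List.pyRange 3 (min ((n : Int) + 1) 6) 1 = [] :=
        PySem.List.pyRange_one_eq_nil (le_trans (min_le_left _ _) (by omega))
      have hb' : PySem.List.pyRange 3 (min (n : Int) 6) 1 = [] :=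
        PySem.List.pyRange_one_eq_nil (le_trans (min_le_left _ _) (by omega))
      have hc : max ((n : Int) + 1 - 6) 0 = 0 := max_eq_right (by omega)
      have hc' : max ((n : Int) - 6) 0 = 0 := max_eq_right (by omega)
      have hf : pvLadder p (n : Int) = p := by
        simp [pvLadder, show (n : Int) < 3 by exact_mod_cast h3]
      rw [ha, hb, hb', hc, hc', List.replicate_succ']
      simp [hf]
    · by_cases h6 : n < 6
      · have ha : min ((n : Int) + 1) 3 = min (n : Int) 3 := by
          rw [min_eq_right (by omega), min_eq_right (by omega)]
        have hb : min ((n : Int) + 1) 6 = (n : Int) + 1 := min_eq_left (by omega)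
        have hb' : min (n : Int) 6 = (n : Int) := min_eq_left (by omega)
        have hc : max ((n : Int) + 1 - 6) 0 = 0 := max_eq_right (by omega)
        have hc' : max ((n : Int) - 6) 0 = 0 := max_eq_right (by omega)
        have hf : pvLadder p (n : Int) = p - ((n : Int) - 2) := by
          unfold pvLadder
          interval_cases n <;> norm_num
        rw [ha, hb, hb', hc, hc',
            PySem.List.pyRange_one_succ_right (by omega), List.map_append]
        simp [hf]
      · have ha : min ((n : Int) + 1) 3 = min (n : Int) 3 := by
          rw [min_eq_right (by omega), min_eq_right (by omega)]
        have hb : min ((n : Int) + 1) 6 = min (n : Int) 6 := by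
          rw [min_eq_right (by omega), min_eq_right (by omega)]
        have hc : (max ((n : Int) + 1 - 6) 0).toNat = (max ((n : Int) - 6) 0).toNat + 1 := by
          rw [max_eq_left (by omega), max_eq_left (by omega)]; omega
        have hf : pvLadder p (n : Int) = p - 4 := by
          unfold pvLadder
          have : ¬ (n : Int) < 3 := by exact_mod_cast h3
          have : ¬ (n : Int) < 6 := by exact_mod_cast h6
          split_ifs <;> omega
        rw [ha, hb, hc, List.replicate_succ']
        simp [hf]

-- ===== VERDICT (by name: the statement is the Claim_ definition above) =====
theorem sarasas_is_int_spec : Claim_equal_sarasas_is_int := by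
  intro k p _
  unfold Spec_sarasas_is_int sarasas_is_int sarasas_is_int_alt
  rw [PySem.List.foldl_append_singleton_eq_map]
  show (PySem.List.pyRange 0 k 1).map (pvLadder p) = _
  by_cases hk : k ≤ 0
  · have : max k 0 = ((0 : Nat) : Int) := by omega
    rw [PySem.List.pyRange_one_eq_nil hk, this, ← pvKey p 0]
    simp [PySem.List.pyRange_one_eq_nil]
  · have : max k 0 = ((k.toNat : Nat) : Int) := by omega
    rw [this, show k = ((k.toNat : Nat) : Int) by omega]
    exact pvKey p k.toNat
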